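-- pv_equiv track=rewrite | github.com/star0418-abc/gromacs1 | pipeline/stages/gromacs.py | _select_energy_index
-- ===== SOURCE A (Python) =====
-- from typing import Any, Dict, List, Optional, Tuple, TYPE_CHECKING
--
-- def _select_energy_index(entries: List[Tuple[int, str]], candidates: List[str]) -> Optional[int]:
--     """Find a deterministic term index from menu entries."""
--     lowered = [(idx, label.lower()) for idx, label in entries]
--     for candidate in candidates:
--         target = candidate.lower()
--         for idx, label in lowered:
--             if label == target:
--                 return idx
--     for candidate in candidates:
--         target = candidate.lower()
--         for idx, label in lowered:
--             if label.startswith(target):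
--                 return idx
--     for candidate in candidates:
--         target = candidate.lower()
--         for idx, label in lowered:
--             if target in label:
--                 return idx
--     return None
-- ===== SOURCE B (Python) =====
-- from typing import List, Optional, Tuple
--
--
-- def _select_energy_index(entries: List[Tuple[int, str]], candidates: List[str]) -> Optional[int]:
--     """Single pass: rank each (candidate, entry) pair and keep the first
--     strictly-best rank seen in (candidate, entry) iteration order."""
--     lowered = [(idx, label.lower()) for idx, label in entries]
--     best_rank = None
--     best_idx = None
--     for candidate in candidates:
--         target = candidate.lower()
--         for idx, label in lowered:
--             if label == target:
--                 rank = 0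
--             elif label.startswith(target):
--                 rank = 1
--             elif target in label:
--                 rank = 2
--             else:
--                 continue
--             if best_rank is None or rank < best_rank:
--                 best_rank = rank
--                 best_idx = idx
--     return best_idx
-- ===== Notes on version B (the rewrite author's own statement) =====
-- stated objective: alternative
-- what changed: Replaces A's three staged full scans (exact, then prefix, then substring) by one nested pass that classifies each (candidate, entry) pair with a match rank 0/1/2 and keeps the first pair with a strictly smaller rank.
import Mathlib
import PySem

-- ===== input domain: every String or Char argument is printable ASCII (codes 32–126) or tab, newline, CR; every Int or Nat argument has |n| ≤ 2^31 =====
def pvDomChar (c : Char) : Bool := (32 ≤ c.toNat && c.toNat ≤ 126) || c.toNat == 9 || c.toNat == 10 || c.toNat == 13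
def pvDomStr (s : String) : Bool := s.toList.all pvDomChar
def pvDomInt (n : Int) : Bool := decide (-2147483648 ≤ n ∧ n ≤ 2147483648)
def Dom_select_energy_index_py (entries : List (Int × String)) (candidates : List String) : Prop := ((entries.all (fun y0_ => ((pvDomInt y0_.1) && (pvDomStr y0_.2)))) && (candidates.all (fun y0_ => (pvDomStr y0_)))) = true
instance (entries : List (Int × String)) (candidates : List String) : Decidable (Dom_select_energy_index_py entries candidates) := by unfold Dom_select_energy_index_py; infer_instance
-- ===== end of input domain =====

-- B replaces A's three staged full scans by one nested pass that ranks each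
-- (candidate, entry) pair 0/1/2 and keeps the first strictly better rank (objective: alternative).

-- ===== PORT A =====
-- phase 1 loop: for candidate in candidates: for idx,label in lowered: if label == target: return idx
def aLoopEq (lowered : List (Int × String)) : List String → Option Int
  | [] => none
  | c :: cs =>
    let target := PySem.Str.lower c
    match lowered.find? (fun p => p.2 == target) with
    | some p => some p.1
    | none => aLoopEq lowered cs

-- phase 2 loop: label.startswith(target)
def aLoopPre (lowered : List (Int × String)) : List String → Option Int
  | [] => none
  | c :: cs =>
    let target := PySem.Str.lower c
    match lowered.find? (fun p => PySem.Str.startswith p.2 target) with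
    | some p => some p.1
    | none => aLoopPre lowered cs

-- phase 3 loop: target in label
def aLoopSub (lowered : List (Int × String)) : List String → Option Int
  | [] => none
  | c :: cs =>
    let target := PySem.Str.lower c
    match lowered.find? (fun p => PySem.Str.isIn target p.2) with
    | some p => some p.1
    | none => aLoopSub lowered cs

def select_energy_index_py (entries : List (Int × String)) (candidates : List String) : Option Int :=
  let lowered := entries.map (fun p => (p.1, PySem.Str.lower p.2))
  match aLoopEq lowered candidates with
  | some i => some i
  | none =>
    match aLoopPre lowered candidates with
    | some i => some i
    | none => aLoopSub lowered candidates

-- ===== PORT B =====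
-- best_rank/best_idx update: take (rank, idx) if no best yet or rank strictly smaller
def bUpd (st : Option (Nat × Int)) (r : Nat) (i : Int) : Option (Nat × Int) :=
  match st with
  | none => some (r, i)
  | some b => if r < b.1 then some (r, i) else st

-- inner loop over lowered entries for one target, if/elif rank chain
def bInner (target : String) (st : Option (Nat × Int)) (lowered : List (Int × String)) :
    Option (Nat × Int) :=
  lowered.foldl (fun st p =>
    if p.2 == target then bUpd st 0 p.1
    else if PySem.Str.startswith p.2 target then bUpd st 1 p.1
    else if PySem.Str.isIn target p.2 then bUpd st 2 p.1
    else st) st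

def select_energy_index_py_alt (entries : List (Int × String)) (candidates : List String) :
    Option Int :=
  let lowered := entries.map (fun p => (p.1, PySem.Str.lower p.2))
  (candidates.foldl (fun st c => bInner (PySem.Str.lower c) st lowered) none).map (·.2)

-- ===== PRECONDITION & SPEC =====
def Spec_select_energy_index_py (entries : List (Int × String)) (candidates : List String) (out : Option Int) : Prop := out = select_energy_index_py_alt entries candidates
instance (entries : List (Int × String)) (candidates : List String) (out : Option Int) : Decidable (Spec_select_energy_index_py entries candidates out) := by unfold Spec_select_energy_index_py; infer_instance

-- ===== CLAIM (what is proved, stated in full; the proofs are below) =====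
def Claim_equal_select_energy_index_py : Prop := ∀ (entries : List (Int × String)) (candidates : List String), Dom_select_energy_index_py entries candidates → Spec_select_energy_index_py entries candidates (select_energy_index_py entries candidates)

-- ===== LEMMAS AND PROOFS =====

def rank? (label target : String) : Option Nat :=
  if label == target then some 0
  else if PySem.Str.startswith label target then some 1
  else if PySem.Str.isIn target label then some 2
  else none
def pairsFor (lowered : List (Int × String)) (target : String) : List (Nat × Int) :=
  lowered.filterMap (fun p => (rank? p.2 target).map (fun r => (r, p.1)))

theorem pairsFor_cons (p : Int × String) (L : List (Int × String)) (t : String) :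
    pairsFor (p :: L) t = match rank? p.2 t with
      | some r => (r, p.1) :: pairsFor L t
      | none => pairsFor L t := by
  cases h : rank? p.2 t <;> simp [pairsFor, h]

theorem rank?_le {l t : String} {r : Nat} (h : rank? l t = some r) : r ≤ 2 := by
  unfold rank? at h
  split_ifs at h <;> (injection h with h; omega)

theorem mem_pairsFor_rank_le {q : Nat × Int} {L : List (Int × String)} {t : String}
    (h : q ∈ pairsFor L t) : q.1 ≤ 2 := by
  obtain ⟨p, _, hp⟩ := List.mem_filterMap.mp h
  obtain ⟨r, hr, rfl⟩ := Option.map_eq_some_iff.mp hp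
  exact rank?_le hr
theorem startswith_of_eq (s t : String) (h : s = t) : PySem.Str.startswith s t = true := by
  subst h
  simp [PySem.Str.startswith_eq, PySem.Chars.startswith_iff]
theorem isIn_of_startswith (s t : String) (h : PySem.Str.startswith s t = true) :
    PySem.Str.isIn t s = true := by
  simp only [PySem.Str.startswith_eq, PySem.Chars.startswith_iff] at h
  simp only [PySem.Str.isIn_eq, PySem.Chars.isIn_iff_infix]
  exact h.isInfix


theorem find?_pairsFor_zero (L : List (Int × String)) (t : String) :
    ((pairsFor L t).find? (fun q => q.1 == 0)).map (·.2)
      = (L.find? (fun p => p.2 == t)).map (·.1) := by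
  induction L with
  | nil => rfl
  | cons p L ih =>
    rw [pairsFor_cons]
    by_cases he : p.2 = t
    · have h0 : rank? p.2 t = some 0 := by unfold rank?; rw [if_pos (by simp [he])]
      rw [h0]
      rw [List.find?_cons_of_pos (by simp), List.find?_cons_of_pos (by simp [he])]
      rfl
    · have hne : (p.2 == t) = false := by simp [he]
      by_cases hs : PySem.Str.startswith p.2 t = true
      · have h1 : rank? p.2 t = some 1 := by unfold rank?; rw [if_neg (by simp [he]), if_pos hs]
        rw [h1, List.find?_cons_of_neg (by simp), List.find?_cons_of_neg (p := fun x : Int × String => x.2 == t) (by simpa using hne)]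
        exact ih
      · by_cases hi : PySem.Str.isIn t p.2 = true
        · have h2 : rank? p.2 t = some 2 := by unfold rank?; rw [if_neg (by simp [he]), if_neg hs, if_pos hi]
          rw [h2, List.find?_cons_of_neg (by simp), List.find?_cons_of_neg (p := fun x : Int × String => x.2 == t) (by simpa using hne)]
          exact ih
        · have h3 : rank? p.2 t = none := by unfold rank?; rw [if_neg (by simp [he]), if_neg hs, if_neg hi]
          rw [h3, List.find?_cons_of_neg (p := fun x : Int × String => x.2 == t) (by simpa using hne)]
          exact ih

theorem find?_pairsFor_le_one (L : List (Int × String)) (t : String) :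
    ((pairsFor L t).find? (fun q => q.1 ≤ 1)).map (·.2)
      = (L.find? (fun p => PySem.Str.startswith p.2 t)).map (·.1) := by
  induction L with
  | nil => rfl
  | cons p L ih =>
    rw [pairsFor_cons]
    by_cases he : p.2 = t
    · have h0 : rank? p.2 t = some 0 := by unfold rank?; rw [if_pos (by simp [he])]
      rw [h0]
      rw [List.find?_cons_of_pos (by simp), List.find?_cons_of_pos (p := fun x : Int × String => PySem.Str.startswith x.2 t) (startswith_of_eq p.2 t he)]
      rfl
    · have hne : (p.2 == t) = false := by simp [he]
      by_cases hs : PySem.Str.startswith p.2 t = true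
      · have h1 : rank? p.2 t = some 1 := by unfold rank?; rw [if_neg (by simp [he]), if_pos hs]
        rw [h1, List.find?_cons_of_pos (by simp), List.find?_cons_of_pos (p := fun x : Int × String => PySem.Str.startswith x.2 t) hs]
        rfl
      · by_cases hi : PySem.Str.isIn t p.2 = true
        · have h2 : rank? p.2 t = some 2 := by unfold rank?; rw [if_neg (by simp [he]), if_neg hs, if_pos hi]
          rw [h2, List.find?_cons_of_neg (by simp),
            List.find?_cons_of_neg (p := fun x : Int × String => PySem.Str.startswith x.2 t) (by simpa using hs)]
          exact ih
        · have h3 : rank? p.2 t = none := by unfold rank?; rw [if_neg (by simp [he]), if_neg hs, if_neg hi]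
          rw [h3, List.find?_cons_of_neg (p := fun x : Int × String => PySem.Str.startswith x.2 t) (by simpa using hs)]
          exact ih

theorem find?_pairsFor_le_two (L : List (Int × String)) (t : String) :
    ((pairsFor L t).find? (fun q => q.1 ≤ 2)).map (·.2)
      = (L.find? (fun p => PySem.Str.isIn t p.2)).map (·.1) := by
  induction L with
  | nil => rfl
  | cons p L ih =>
    rw [pairsFor_cons]
    by_cases he : p.2 = t
    · have h0 : rank? p.2 t = some 0 := by unfold rank?; rw [if_pos (by simp [he])]
      rw [h0]
      rw [List.find?_cons_of_pos (by simp),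
        List.find?_cons_of_pos (p := fun x : Int × String => PySem.Str.isIn t x.2) (isIn_of_startswith p.2 t (startswith_of_eq p.2 t he))]
      rfl
    · have hne : (p.2 == t) = false := by simp [he]
      by_cases hs : PySem.Str.startswith p.2 t = true
      · have h1 : rank? p.2 t = some 1 := by unfold rank?; rw [if_neg (by simp [he]), if_pos hs]
        rw [h1, List.find?_cons_of_pos (by simp),
          List.find?_cons_of_pos (p := fun x : Int × String => PySem.Str.isIn t x.2) (isIn_of_startswith p.2 t hs)]
        rfl
      · by_cases hi : PySem.Str.isIn t p.2 = true
        · have h2 : rank? p.2 t = some 2 := by unfold rank?; rw [if_neg (by simp [he]), if_neg hs, if_pos hi]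
          rw [h2, List.find?_cons_of_pos (by simp), List.find?_cons_of_pos (p := fun x : Int × String => PySem.Str.isIn t x.2) hi]
          rfl
        · have h3 : rank? p.2 t = none := by unfold rank?; rw [if_neg (by simp [he]), if_neg hs, if_neg hi]
          rw [h3, List.find?_cons_of_neg (p := fun x : Int × String => PySem.Str.isIn t x.2) (by simpa using hi)]
          exact ih

def bestFold (l : List (Nat × Int)) (st : Option (Nat × Int)) : Option (Nat × Int) :=
  l.foldl (fun st q => bUpd st q.1 q.2) st

theorem find?_congr' {α : Type} {P Q : α → Bool} (l : List α) (h : ∀ x ∈ l, P x = Q x) :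
    l.find? P = l.find? Q := by
  induction l with
  | nil => rfl
  | cons a l ih =>
    rw [List.find?_cons, List.find?_cons, h a (by simp)]
    cases hq : Q a
    · exact ih (fun x hx => h x (by simp [hx]))
    · rfl

theorem bestFold_stay (l : List (Nat × Int)) (a : Nat × Int) (h : ∀ q ∈ l, a.1 ≤ q.1) :
    bestFold l (some a) = some a := by
  induction l with
  | nil => rfl
  | cons q l ih =>
    have h1 : a.1 ≤ q.1 := h q (by simp)
    have : bUpd (some a) q.1 q.2 = some a := by
      simp [bUpd, Nat.not_lt.mpr h1]
    simp only [bestFold, List.foldl_cons, this]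
    exact ih (fun x hx => h x (by simp [hx]))

theorem bestFold_find_some (l : List (Nat × Int)) (r : Nat) (a : Nat × Int)
    (hlb : ∀ q ∈ l, r ≤ q.1) (hex : ∃ q ∈ l, q.1 = r) (ha : r < a.1) :
    bestFold l (some a) = l.find? (fun q => q.1 == r) := by
  induction l generalizing a with
  | nil => obtain ⟨q, hq, _⟩ := hex; simp at hq
  | cons q l ih =>
    by_cases hq : q.1 = r
    · have hu : bUpd (some a) q.1 q.2 = some q := by
        simp [bUpd, hq ▸ ha]
      simp only [bestFold, List.foldl_cons, hu]
      rw [List.find?_cons_of_pos (by simp [hq])]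
      exact bestFold_stay l q (fun x hx => hq ▸ hlb x (by simp [hx]))
    · have hgt : r < q.1 := Nat.lt_of_le_of_ne (hlb q (by simp)) (fun h => hq h.symm)
      have hex' : ∃ x ∈ l, x.1 = r := by
        obtain ⟨x, hx, hxr⟩ := hex
        rcases List.mem_cons.mp hx with h | h
        · exact absurd (h ▸ hxr) hq
        · exact ⟨x, h, hxr⟩
      rw [List.find?_cons_of_neg (by simp [hq])]
      by_cases hlt : q.1 < a.1
      · have hu : bUpd (some a) q.1 q.2 = some (q.1, q.2) := by simp [bUpd, hlt]
        simp only [bestFold, List.foldl_cons, hu]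
        exact ih (q.1, q.2) (fun x hx => hlb x (by simp [hx])) hex' hgt
      · have hu : bUpd (some a) q.1 q.2 = some a := by simp [bUpd, hlt]
        simp only [bestFold, List.foldl_cons, hu]
        exact ih a (fun x hx => hlb x (by simp [hx])) hex' ha

theorem bestFold_find (l : List (Nat × Int)) (r : Nat)
    (hlb : ∀ q ∈ l, r ≤ q.1) (hex : ∃ q ∈ l, q.1 = r) :
    bestFold l none = l.find? (fun q => q.1 == r) := by
  cases l with
  | nil => obtain ⟨q, hq, _⟩ := hex; simp at hq
  | cons q l =>
    have h0 : bestFold (q :: l) none = bestFold l (some q) := by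
      simp [bestFold, bUpd]
    rw [h0]
    by_cases hq : q.1 = r
    · rw [List.find?_cons_of_pos (by simp [hq])]
      exact bestFold_stay l q (fun x hx => hq ▸ hlb x (by simp [hx]))
    · have hgt : r < q.1 := Nat.lt_of_le_of_ne (hlb q (by simp)) (fun h => hq h.symm)
      have hex' : ∃ x ∈ l, x.1 = r := by
        obtain ⟨x, hx, hxr⟩ := hex
        rcases List.mem_cons.mp hx with h | h
        · exact absurd (h ▸ hxr) hq
        · exact ⟨x, h, hxr⟩
      rw [List.find?_cons_of_neg (by simp [hq])]
      exact bestFold_find_some l r q (fun x hx => hlb x (by simp [hx])) hex' hgt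

def allPairs (lowered : List (Int × String)) (cands : List String) : List (Nat × Int) :=
  cands.flatMap (fun c => pairsFor lowered (PySem.Str.lower c))

theorem allPairs_cons (L : List (Int × String)) (c : String) (cs : List String) :
    allPairs L (c :: cs) = pairsFor L (PySem.Str.lower c) ++ allPairs L cs := by
  simp [allPairs]

theorem mem_allPairs_rank_le {q : Nat × Int} {L : List (Int × String)} {cs : List String}
    (h : q ∈ allPairs L cs) : q.1 ≤ 2 := by
  obtain ⟨c, _, hq⟩ := List.mem_flatMap.mp h
  exact mem_pairsFor_rank_le hq

theorem aLoopEq_eq (L : List (Int × String)) (cs : List String) :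
    aLoopEq L cs = ((allPairs L cs).find? (fun q => q.1 == 0)).map (·.2) := by
  induction cs with
  | nil => rfl
  | cons c cs ih =>
    rw [allPairs_cons, List.find?_append]
    have h := find?_pairsFor_zero L (PySem.Str.lower c)
    cases hf : L.find? (fun p => p.2 == PySem.Str.lower c) with
    | some p =>
      rw [hf] at h
      obtain ⟨q, hq, hq2⟩ := Option.map_eq_some_iff.mp h
      simp only [aLoopEq]
      rw [hf]
      simp [hq, hq2]
    | none =>
      rw [hf] at h
      have hnone : (pairsFor L (PySem.Str.lower c)).find? (fun q => q.1 == 0) = none := by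
        cases hfp : (pairsFor L (PySem.Str.lower c)).find? (fun q => q.1 == 0) <;>
          simp [hfp] at h ⊢
      simp only [aLoopEq]
      rw [hf, hnone]
      simp [ih]

theorem aLoopPre_eq (L : List (Int × String)) (cs : List String) :
    aLoopPre L cs = ((allPairs L cs).find? (fun q => q.1 ≤ 1)).map (·.2) := by
  induction cs with
  | nil => rfl
  | cons c cs ih =>
    rw [allPairs_cons, List.find?_append]
    have h := find?_pairsFor_le_one L (PySem.Str.lower c)
    cases hf : L.find? (fun p => PySem.Str.startswith p.2 (PySem.Str.lower c)) with
    | some p =>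
      rw [hf] at h
      obtain ⟨q, hq, hq2⟩ := Option.map_eq_some_iff.mp h
      simp only [aLoopPre]
      rw [hf]
      simp [hq, hq2]
    | none =>
      rw [hf] at h
      have hnone : (pairsFor L (PySem.Str.lower c)).find? (fun q => q.1 ≤ 1) = none := by
        cases hfp : (pairsFor L (PySem.Str.lower c)).find? (fun q => q.1 ≤ 1) <;>
          simp [hfp] at h ⊢
      simp only [aLoopPre]
      rw [hf, hnone]
      simp [ih]

theorem aLoopSub_eq (L : List (Int × String)) (cs : List String) :
    aLoopSub L cs = ((allPairs L cs).find? (fun q => q.1 ≤ 2)).map (·.2) := by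
  induction cs with
  | nil => rfl
  | cons c cs ih =>
    rw [allPairs_cons, List.find?_append]
    have h := find?_pairsFor_le_two L (PySem.Str.lower c)
    cases hf : L.find? (fun p => PySem.Str.isIn (PySem.Str.lower c) p.2) with
    | some p =>
      rw [hf] at h
      obtain ⟨q, hq, hq2⟩ := Option.map_eq_some_iff.mp h
      simp only [aLoopSub]
      rw [hf]
      simp [hq, hq2]
    | none =>
      rw [hf] at h
      have hnone : (pairsFor L (PySem.Str.lower c)).find? (fun q => q.1 ≤ 2) = none := by
        cases hfp : (pairsFor L (PySem.Str.lower c)).find? (fun q => q.1 ≤ 2) <;>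
          simp [hfp] at h ⊢
      simp only [aLoopSub]
      rw [hf, hnone]
      simp [ih]

theorem bInner_eq (t : String) (st : Option (Nat × Int)) (L : List (Int × String)) :
    bInner t st L = bestFold (pairsFor L t) st := by
  induction L generalizing st with
  | nil => rfl
  | cons p L ih =>
    rw [pairsFor_cons]
    by_cases he : p.2 = t
    · have h0 : rank? p.2 t = some 0 := by unfold rank?; rw [if_pos (by simp [he])]
      rw [h0]
      have hstep : bInner t st (p :: L) = bInner t (bUpd st 0 p.1) L := by
        simp [bInner, he]
      rw [hstep, ih]
      rfl
    · by_cases hs : PySem.Str.startswith p.2 t = true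
      · have h1 : rank? p.2 t = some 1 := by
          unfold rank?; rw [if_neg (by simp [he]), if_pos hs]
        rw [h1]
        have hs' : PySem.Chars.startswith p.2.toList t.toList = true := by simpa using hs
        have hstep : bInner t st (p :: L) = bInner t (bUpd st 1 p.1) L := by
          simp [bInner, he, hs']
        rw [hstep, ih]
        rfl
      · by_cases hi : PySem.Str.isIn t p.2 = true
        · have h2 : rank? p.2 t = some 2 := by
            unfold rank?; rw [if_neg (by simp [he]), if_neg hs, if_pos hi]
          rw [h2]
          have hs' : PySem.Chars.startswith p.2.toList t.toList = false := by simpa using hs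
          have hi' : PySem.Chars.isIn t.toList p.2.toList = true := by simpa using hi
          have hstep : bInner t st (p :: L) = bInner t (bUpd st 2 p.1) L := by
            simp [bInner, he, hs', hi']
          rw [hstep, ih]
          rfl
        · have h3 : rank? p.2 t = none := by
            unfold rank?; rw [if_neg (by simp [he]), if_neg hs, if_neg hi]
          rw [h3]
          have hs' : PySem.Chars.startswith p.2.toList t.toList = false := by simpa using hs
          have hi' : PySem.Chars.isIn t.toList p.2.toList = false := by simpa using hi
          have hstep : bInner t st (p :: L) = bInner t st L := by
            simp [bInner, he, hs', hi']
          rw [hstep, ih]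

theorem bFold_eq (L : List (Int × String)) (cs : List String) (st : Option (Nat × Int)) :
    cs.foldl (fun st c => bInner (PySem.Str.lower c) st L) st = bestFold (allPairs L cs) st := by
  induction cs generalizing st with
  | nil => rfl
  | cons c cs ih =>
    rw [List.foldl_cons, allPairs_cons]
    rw [show bestFold (pairsFor L (PySem.Str.lower c) ++ allPairs L cs) st
        = bestFold (allPairs L cs) (bestFold (pairsFor L (PySem.Str.lower c)) st) from by
      simp [bestFold, List.foldl_append]]
    rw [← bInner_eq]
    exact ih _

-- ===== VERDICT (by name: the statement is the Claim_ definition above) =====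
theorem select_energy_index_py_spec : Claim_equal_select_energy_index_py := by
  intro entries candidates _
  unfold Spec_select_energy_index_py
  simp only [select_energy_index_py, select_energy_index_py_alt,
    aLoopEq_eq, aLoopPre_eq, aLoopSub_eq, bFold_eq]
  set l := allPairs (entries.map fun p => (p.1, PySem.Str.lower p.2)) candidates with hl
  have hle : ∀ q ∈ l, q.1 ≤ 2 := fun q hq => mem_allPairs_rank_le hq
  by_cases h0 : ∃ q ∈ l, q.1 = 0
  · have hsome : (l.find? (fun q => q.1 == 0)).isSome := by
      obtain ⟨q, hq, hq0⟩ := h0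
      exact List.find?_isSome.mpr ⟨q, hq, by simp [hq0]⟩
    obtain ⟨p, hf⟩ := Option.isSome_iff_exists.mp hsome
    rw [bestFold_find l 0 (fun q _ => Nat.zero_le _) h0, hf]
    simp
  · have hn0 : l.find? (fun q => q.1 == 0) = none :=
      List.find?_eq_none.mpr (fun q hq => by simp; exact fun h => h0 ⟨q, hq, h⟩)
    have hlb1 : ∀ q ∈ l, 1 ≤ q.1 := fun q hq =>
      Nat.one_le_iff_ne_zero.mpr (fun h => h0 ⟨q, hq, h⟩)
    by_cases h1 : ∃ q ∈ l, q.1 = 1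
    · have hcong : l.find? (fun q => q.1 ≤ 1) = l.find? (fun q => q.1 == 1) :=
        find?_congr' l (fun q hq => by
          have := hlb1 q hq
          rw [Bool.eq_iff_iff]
          simp
          omega)
      have hsome : (l.find? (fun q => q.1 == 1)).isSome := by
        obtain ⟨q, hq, hq1⟩ := h1
        exact List.find?_isSome.mpr ⟨q, hq, by simp [hq1]⟩
      obtain ⟨p, hf⟩ := Option.isSome_iff_exists.mp hsome
      rw [bestFold_find l 1 hlb1 h1, hn0, hcong, hf]
      simp
    · have hlb2 : ∀ q ∈ l, 2 ≤ q.1 := fun q hq => by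
        have hq0 : q.1 ≠ 0 := fun hh => h0 ⟨q, hq, hh⟩
        have hq1 : q.1 ≠ 1 := fun hh => h1 ⟨q, hq, hh⟩
        omega
      have hn1 : l.find? (fun q => q.1 ≤ 1) = none :=
        List.find?_eq_none.mpr (fun q hq => by
          have := hlb2 q hq
          simp
          omega)
      by_cases h2 : ∃ q ∈ l, q.1 = 2
      · have hcong : l.find? (fun q => q.1 ≤ 2) = l.find? (fun q => q.1 == 2) :=
          find?_congr' l (fun q hq => by
            have := hlb2 q hq
            have := hle q hq
            rw [Bool.eq_iff_iff]
            simp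
            omega)
        have hsome : (l.find? (fun q => q.1 == 2)).isSome := by
          obtain ⟨q, hq, hq2⟩ := h2
          exact List.find?_isSome.mpr ⟨q, hq, by simp [hq2]⟩
        obtain ⟨p, hf⟩ := Option.isSome_iff_exists.mp hsome
        rw [bestFold_find l 2 hlb2 h2, hn0, hn1, hcong, hf]
        simp
      · have hnil : l = [] := List.eq_nil_iff_forall_not_mem.mpr (fun q hq => by
          have := hle q hq
          have := hlb2 q hq
          exact h2 ⟨q, hq, by omega⟩)
        rw [hnil]
        rfl
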